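-- pv_equiv track=rewrite | github.com/n4nirmalyapratap/indian-stock-market-analyzer | artifacts/python-backend/app/services/options_service.py | get_lot_size
-- ===== SOURCE A (Python) =====
-- LOT_SIZES: dict[str, int] = {
--     "NIFTY":       75,
--     "NIFTY50":     75,
--     "^NSEI":       75,
--     "BANKNIFTY":   30,
--     "^NSEBANK":    30,
--     "FINNIFTY":    65,   # SEBI/HO/MRD/MRD-PoD-2/P/CIR/2024/113 — effective Nov 2024
--     "^CNXFIN":     65,   # SEBI/HO/MRD/MRD-PoD-2/P/CIR/2024/113 — effective Nov 2024
--     "MIDCPNIFTY":  120,  # SEBI/HO/MRD/MRD-PoD-2/P/CIR/2024/113 — effective Nov 2024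
--     "^NSMIDCP":    120,  # SEBI/HO/MRD/MRD-PoD-2/P/CIR/2024/113 — effective Nov 2024
--     "SENSEX":      10,
--     "^BSESN":      10,
--     "BANKEX":      15,
--     "^BSXN":       15,
--     "BANKEX.BO":   15,
-- }
--
-- DEFAULT_LOT_SIZE = 100
--
-- def get_lot_size(symbol: str) -> int:
--     upper = symbol.upper()
--     # Exact match first
--     if upper in LOT_SIZES:
--         return LOT_SIZES[upper]
--     # Substring match — longest key wins to avoid "NIFTY" matching inside "BANKNIFTY"
--     matches = [(k, v) for k, v in LOT_SIZES.items() if k in upper]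
--     if matches:
--         return max(matches, key=lambda x: len(x[0]))[1]
--     return DEFAULT_LOT_SIZE
-- ===== SOURCE B (Python) =====
-- LOT_SIZES: dict[str, int] = {
--     "NIFTY":       75,
--     "NIFTY50":     75,
--     "^NSEI":       75,
--     "BANKNIFTY":   30,
--     "^NSEBANK":    30,
--     "FINNIFTY":    65,
--     "^CNXFIN":     65,
--     "MIDCPNIFTY":  120,
--     "^NSMIDCP":    120,
--     "SENSEX":      10,
--     "^BSESN":      10,
--     "BANKEX":      15,
--     "^BSXN":       15,
--     "BANKEX.BO":   15,
-- }
--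
-- DEFAULT_LOT_SIZE = 100
--
-- # Precomputed once: items sorted by descending key length with a STABLE sort,
-- # so equal-length keys keep the dict's insertion order (max's tie-break).
-- _ITEMS_BY_LEN_DESC = sorted(LOT_SIZES.items(), key=lambda kv: -len(kv[0]))
--
-- def get_lot_size(symbol: str) -> int:
--     # First contained key in length-descending order is the longest match;
--     # an exact match is the unique contained key of maximal possible length,
--     # so no separate exact-match branch is needed.
--     upper = symbol.upper()
--     for k, v in _ITEMS_BY_LEN_DESC:
--         if k in upper:
--             return v
--     return DEFAULT_LOT_SIZE
-- ===== Notes on version B (the rewrite author's own statement) =====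
-- stated objective: simpler
-- what changed: B precomputes the items once, stably sorted by descending key length, and get_lot_size is a single first-match scan over that list; A's exact-match branch, the collected matches list and the max() call all disappear.
import Mathlib
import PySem

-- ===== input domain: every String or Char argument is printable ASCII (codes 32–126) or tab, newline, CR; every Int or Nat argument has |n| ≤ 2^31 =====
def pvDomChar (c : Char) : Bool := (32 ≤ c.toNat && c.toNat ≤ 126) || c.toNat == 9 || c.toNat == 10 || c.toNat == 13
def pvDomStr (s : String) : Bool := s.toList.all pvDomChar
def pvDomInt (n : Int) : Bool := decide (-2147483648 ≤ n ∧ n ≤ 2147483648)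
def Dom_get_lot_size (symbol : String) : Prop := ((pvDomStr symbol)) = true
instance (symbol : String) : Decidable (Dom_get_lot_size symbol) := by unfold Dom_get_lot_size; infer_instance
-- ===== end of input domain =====

-- B precomputes the items once, stably sorted by descending key length, and looks the
-- symbol up by a single first-match scan over that list; A's exact-match branch, the
-- collected matches list and the max() call all disappear (objective: simpler).


-- ===== PORT A =====
-- Module-level data shared by both versions (same-module constant in the Python file).
def LOT_SIZES : PySem.Dict String Int := PySem.Dict.ofList
  [("NIFTY", 75), ("NIFTY50", 75), ("^NSEI", 75), ("BANKNIFTY", 30), ("^NSEBANK", 30),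
   ("FINNIFTY", 65), ("^CNXFIN", 65), ("MIDCPNIFTY", 120), ("^NSMIDCP", 120),
   ("SENSEX", 10), ("^BSESN", 10), ("BANKEX", 15), ("^BSXN", 15), ("BANKEX.BO", 15)]

def DEFAULT_LOT_SIZE : Int := 100

-- A's body after `upper = symbol.upper()`, as a helper on `upper`.
def pvA_core (upper : String) : Int :=
  match LOT_SIZES.get? upper with
  | some v => v
  | none =>
    let ms := LOT_SIZES.items.filter (fun kv => PySem.Str.isIn kv.1 upper)
    match PySem.List.max? ms (fun kv => PySem.Str.len kv.1) with
    | some m => m.2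
    | none => DEFAULT_LOT_SIZE

def get_lot_size (symbol : String) : Int := pvA_core (PySem.Str.upper symbol)

-- ===== PORT B =====
-- Precomputed once (module level in Source B): items stably sorted by descending key length.
def pvItemsByLenDesc : List (String × Int) :=
  PySem.List.sorted LOT_SIZES.items (fun kv => -(PySem.Str.len kv.1)) false

-- B's for-loop with early return: first key in the length-ordered list contained in `upper`.
def pvB_core (upper : String) : Int :=
  match pvItemsByLenDesc.find? (fun kv => PySem.Str.isIn kv.1 upper) with
  | some kv => kv.2
  | none => DEFAULT_LOT_SIZE

def get_lot_size_alt (symbol : String) : Int := pvB_core (PySem.Str.upper symbol)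

-- ===== PRECONDITION & SPEC =====
def Spec_get_lot_size (symbol : String) (out : Int) : Prop := out = get_lot_size_alt symbol
instance (symbol : String) (out : Int) : Decidable (Spec_get_lot_size symbol out) := by unfold Spec_get_lot_size; infer_instance

-- ===== CLAIM (what is proved, stated in full; the proofs are below) =====
def Claim_equal_get_lot_size : Prop := ∀ (symbol : String), Dom_get_lot_size symbol → Spec_get_lot_size symbol (get_lot_size symbol)

-- ===== LEMMAS AND PROOFS =====

-- A sublist avoiding `o` survives erasing `o`.
theorem pv_sublist_erase_of_not_mem {α : Type} [DecidableEq α] (o : α) :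
    ∀ {l is : List α}, l.Sublist is → o ∉ l → l.Sublist (is.erase o) := by
  intro l is h
  induction h with
  | slnil => intro _; simp
  | @cons l' is' x h ih =>
    intro ho
    by_cases hx : x = o
    · subst hx; rw [List.erase_cons_head]; exact h
    · rw [List.erase_cons_tail (by simpa using hx)]
      exact (ih ho).cons x
  | @cons₂ l' is' x h ih =>
    intro ho
    have hx : x ≠ o := fun hxo => ho (hxo ▸ List.mem_cons_self ..)
    rw [List.erase_cons_tail (by simpa using hx)]
    exact (ih (fun hm => ho (List.mem_cons_of_mem _ hm))).cons₂ x

-- Filtering ignores an element the predicate rejects.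
theorem pv_filter_eq_filter_erase {α : Type} [DecidableEq α] (f : α → Bool) (o : α)
    (hf : f o = false) : ∀ (is : List α), is.filter f = (is.erase o).filter f := by
  intro is
  induction is with
  | nil => rfl
  | cons x t ih =>
    by_cases hx : x = o
    · subst hx; rw [List.erase_cons_head, List.filter_cons_of_neg (by simp [hf])]
    · rw [List.erase_cons_tail (by simpa using hx), List.filter_cons, List.filter_cons, ih]

-- The step function of Python's max (first maximal element), named so rewrites are syntactic.
def pvMaxStep {α : Type} (ℓ : α → Int) : Option α → α → Option α := fun acc x =>
  match acc with
  | none => some x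
  | some m => if ℓ m < ℓ x then some x else some m

theorem pv_max?_eq_foldl {α : Type} (ℓ : α → Int) (xs : List α) :
    PySem.List.max? xs ℓ = xs.foldl (pvMaxStep ℓ) none := rfl

-- Python max (first maximal element): strictly smaller before, no larger after ⇒ the middle wins.
theorem pv_max?_append_first {α : Type} (ℓ : α → Int) (ys zs : List α) (o : α)
    (hy : ∀ y ∈ ys, ℓ y < ℓ o) (hz : ∀ z ∈ zs, ℓ z ≤ ℓ o) :
    PySem.List.max? (ys ++ o :: zs) ℓ = some o := by
  have aux : ∀ (ws : List α), (∀ w ∈ ws, ℓ w ≤ ℓ o) →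
      ws.foldl (pvMaxStep ℓ) (some o) = some o := by
    intro ws
    induction ws with
    | nil => intro _; rfl
    | cons w t ih =>
      intro hw
      have h1 : ¬ ℓ o < ℓ w := not_lt.mpr (hw w (List.mem_cons_self ..))
      simp only [List.foldl_cons, pvMaxStep, if_neg h1]
      exact ih (fun x hx => hw x (List.mem_cons_of_mem _ hx))
  rw [pv_max?_eq_foldl, List.foldl_append, ← pv_max?_eq_foldl]
  rcases hm : PySem.List.max? ys ℓ with _ | m
  · exact aux zs hz
  · have hmem := PySem.List.max?_mem hm
    simp only [List.foldl_cons, pvMaxStep, if_pos (hy m hmem)]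
    exact aux zs hz

-- If [o, x] is a sublist of p ++ o :: q and o occurs only in the middle, x lies in q.
theorem pv_mem_right_of_pair_sublist {α : Type} {o x : α} {p q : List α}
    (h : ([o, x] : List α).Sublist (p ++ o :: q)) (hop : o ∉ p) (hoq : o ∉ q)
    (hx : x ≠ o) : x ∈ q := by
  rcases List.sublist_append_iff.mp h with ⟨l₁, l₂, heq, h₁, h₂⟩
  match l₁, heq with
  | [], heq =>
    have hl₂ : l₂ = [o, x] := by simpa using heq.symm
    subst hl₂
    rcases List.sublist_cons_iff.mp h₂ with h' | ⟨r, hr, hr'⟩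
    · exact absurd (h'.subset (List.mem_cons_self ..)) hoq
    · have hrx : r = [x] := by
        have := congrArg List.tail hr
        simpa using this.symm
      subst hrx
      exact List.singleton_sublist.mp hr'
  | [a], heq =>
    have ha : o = a := by simpa using congrArg List.head? heq
    have hl₂ : l₂ = [x] := by simpa using (congrArg List.tail heq).symm
    subst hl₂
    rcases List.mem_cons.mp (List.singleton_sublist.mp h₂) with h' | h'
    · exact absurd h' hx
    · exact h'
  | a :: b :: l₁', heq =>
    have ha : o = a := by simpa using congrArg List.head? heq
    rw [← ha] at h₁
    exact absurd (h₁.subset (List.mem_cons_self ..)) hop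

-- MAIN: a first-match scan over a stable descending-by-ℓ rearrangement of `is`
-- computes Python's max(filter f is, key=ℓ).
theorem pv_find?_stable_sorted_eq_max? {α : Type} [DecidableEq α] (ℓ : α → Int) :
    ∀ (os is : List α), is.Nodup → os.Perm is →
    os.Pairwise (fun a b => ℓ b ≤ ℓ a) →
    (∀ a ∈ os, ∀ b ∈ os, ([a, b] : List α).Sublist os → ℓ a = ℓ b → ([a, b] : List α).Sublist is) →
    ∀ f : α → Bool, os.find? f = PySem.List.max? (is.filter f) ℓ := by
  intro os
  induction os with
  | nil =>
    intro is _ hp _ _ f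
    rw [List.nil_perm.mp hp]
    rfl
  | cons o os' ih =>
    intro is hnd hp hpw hst f
    have hnd_os : (o :: os').Nodup := (hp.nodup_iff).mpr hnd
    have ho_nmem : o ∉ os' := (List.nodup_cons.mp hnd_os).1
    have hle : ∀ b ∈ os', ℓ b ≤ ℓ o := (List.pairwise_cons.mp hpw).1
    by_cases hf : f o = true
    · rw [List.find?_cons_of_pos hf]
      obtain ⟨p, q, rfl⟩ := List.append_of_mem (hp.mem_iff.mp (List.mem_cons_self ..))
      have hop : o ∉ p := fun hm => by
        have := List.disjoint_of_nodup_append hnd hm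
        exact this (List.mem_cons_self ..)
      have hoq : o ∉ q := by
        have : (o :: q).Nodup := (List.nodup_append.mp hnd).2.1
        exact (List.nodup_cons.mp this).1
      have hmem_os : ∀ x, x ∈ p ++ o :: q → x ∈ o :: os' := fun x hx => hp.symm.mem_iff.mp hx
      rw [List.filter_append, List.filter_cons_of_pos hf]
      symm
      apply pv_max?_append_first
      · intro y hy
        have hyp : y ∈ p := (List.mem_filter.mp hy).1
        have hyo : y ≠ o := fun h => hop (h ▸ hyp)
        have hyos' : y ∈ os' := by
          rcases List.mem_cons.mp (hmem_os y (List.mem_append_left _ hyp)) with h | h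
          · exact absurd h hyo
          · exact h
        rcases lt_or_eq_of_le (hle y hyos') with h | h
        · exact h
        · exfalso
          have hsub : ([o, y] : List α).Sublist (o :: os') := List.cons_sublist_cons.mpr (List.singleton_sublist.mpr hyos')
          have := hst o (List.mem_cons_self ..) y (List.mem_cons_of_mem _ hyos') hsub h.symm
          have hyq := pv_mem_right_of_pair_sublist this hop hoq hyo
          exact (List.disjoint_of_nodup_append hnd) hyp (List.mem_cons_of_mem _ hyq)
      · intro z hz
        have hzq : z ∈ q := (List.mem_filter.mp hz).1
        rcases List.mem_cons.mp (hmem_os z (List.mem_append_right _ (List.mem_cons_of_mem _ hzq))) with h | h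
        · exact le_of_eq (by rw [h])
        · exact hle z h
    · have hf' : f o = false := by simpa using hf
      rw [List.find?_cons_of_neg (by simp [hf'])]
      rw [pv_filter_eq_filter_erase f o hf' is]
      apply ih (is.erase o) (hnd.erase o)
      · have := hp.erase o
        rwa [List.erase_cons_head] at this
      · exact (List.pairwise_cons.mp hpw).2
      · intro a ha b hb hs heq
        have hin : ([a, b] : List α).Sublist is :=
          hst a (List.mem_cons_of_mem _ ha) b (List.mem_cons_of_mem _ hb) (hs.cons o) heq
        apply pv_sublist_erase_of_not_mem o hin
        intro hm
        rcases List.mem_cons.mp hm with h | h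
        · exact ho_nmem (h ▸ ha)
        · rcases List.mem_cons.mp h with h' | h'
          · exact ho_nmem (h' ▸ hb)
          · simp at h'

-- The fallback branches of the two cores agree for EVERY upper-string.
set_option maxHeartbeats 2000000 in
theorem pv_fallback_eq (upper : String) :
    pvItemsByLenDesc.find? (fun kv => PySem.Str.isIn kv.1 upper) =
      PySem.List.max? (LOT_SIZES.items.filter (fun kv => PySem.Str.isIn kv.1 upper))
        (fun kv => PySem.Str.len kv.1) := by
  exact pv_find?_stable_sorted_eq_max? (fun kv => PySem.Str.len kv.1)
    pvItemsByLenDesc LOT_SIZES.items (by decide)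
    (PySem.List.sorted_perm _ _ _)
    ((PySem.List.sorted_pairwise LOT_SIZES.items
        (fun kv => -(PySem.Str.len kv.1))).imp (fun h => by dsimp only at h ⊢; omega))
    (by decide) _

-- If `upper` is exactly a key of the dict, the two cores agree (14 concrete cases).
set_option maxHeartbeats 2000000 in
theorem pv_core_eq_of_key (upper : String) (v : Int)
    (hg : LOT_SIZES.get? upper = some v) : pvA_core upper = pvB_core upper := by
  have hmem : upper ∈ LOT_SIZES.keys := by
    by_contra hn
    rw [← PySem.Dict.get?_eq_none_iff_not_mem_keys] at hn
    rw [hn] at hg; cases hg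
  have hk : LOT_SIZES.keys = ["NIFTY", "NIFTY50", "^NSEI", "BANKNIFTY", "^NSEBANK",
      "FINNIFTY", "^CNXFIN", "MIDCPNIFTY", "^NSMIDCP", "SENSEX", "^BSESN", "BANKEX",
      "^BSXN", "BANKEX.BO"] := by decide
  rw [hk] at hmem
  simp only [List.mem_cons, List.not_mem_nil, or_false] at hmem
  rcases hmem with rfl|rfl|rfl|rfl|rfl|rfl|rfl|rfl|rfl|rfl|rfl|rfl|rfl|rfl <;> decide

-- ===== VERDICT (by name: the statement is the Claim_ definition above) =====
theorem get_lot_size_spec : Claim_equal_get_lot_size := by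
  intro symbol _
  unfold Spec_get_lot_size get_lot_size get_lot_size_alt
  set u := PySem.Str.upper symbol
  rcases hg : LOT_SIZES.get? u with _ | v
  · unfold pvA_core pvB_core
    rw [hg, pv_fallback_eq]
  · exact pv_core_eq_of_key u v hg
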